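-- pv_equiv track=rewrite | github.com/jtreeves/advent_of_code_2024_solutions | day_2/solution.py | determine_acceptable_variance_with_dampener
-- ===== SOURCE A (Python) =====
-- from typing import List
--
-- def determine_acceptable_variance_with_dampener(vector: List[int], problems: int = 0) -> bool:
--     if problems > 1:
--         return False
--     for i in range(len(vector) - 1):
--         difference = abs(vector[i] - vector[i + 1])
--         if difference == 0 or difference > 3:
--             return determine_acceptable_variance_with_dampener(vector[:i] + vector[i + 1:], problems + 1)
--     return True
-- ===== SOURCE B (Python) =====
-- def determine_acceptable_variance_with_dampener(vector, problems=0):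
--     v = vector
--     p = problems
--     while p <= 1:
--         bad = None
--         for k in range(len(v) - 1):
--             d = abs(v[k] - v[k + 1])
--             if d == 0 or d > 3:
--                 bad = k
--                 break
--         if bad is None:
--             return True
--         v = v[:bad] + v[bad + 1:]
--         p += 1
--     return False
-- ===== Notes on version B (the rewrite author's own statement) =====
-- stated objective: simpler
-- what changed: Replaces A's depth-bounded tail recursion with an explicit iterative while-loop that keeps a working list and a removal budget, finding the first offending index per pass and slicing it out.
import Mathlib
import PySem

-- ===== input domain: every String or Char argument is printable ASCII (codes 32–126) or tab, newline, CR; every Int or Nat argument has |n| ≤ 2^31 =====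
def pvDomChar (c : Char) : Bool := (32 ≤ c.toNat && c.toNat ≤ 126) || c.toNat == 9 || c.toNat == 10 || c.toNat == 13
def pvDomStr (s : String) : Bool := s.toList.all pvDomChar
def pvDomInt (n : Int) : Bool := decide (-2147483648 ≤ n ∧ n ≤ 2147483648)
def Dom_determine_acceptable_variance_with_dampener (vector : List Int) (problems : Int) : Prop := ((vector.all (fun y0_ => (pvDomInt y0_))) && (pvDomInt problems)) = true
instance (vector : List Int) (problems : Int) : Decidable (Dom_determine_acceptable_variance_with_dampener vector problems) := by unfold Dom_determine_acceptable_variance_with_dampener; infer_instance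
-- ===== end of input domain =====

-- B replaces A's depth-bounded tail recursion with an explicit iterative loop (find first
-- offending index, slice it out, bump the budget); objective: simpler decomposition, same cost.

-- ===== PORT A =====
-- A: recursive; the inner `for i in range(len(vector)-1)` scan is carried as (pre, rest) with
-- pre ++ rest = vector, so the recursive call's vector[:i] + vector[i+1:] is pre ++ tail-after-
-- dropping the left element of the first bad pair.
mutual
def determine_acceptable_variance_with_dampener (vector : List Int) (problems : Int) : Bool :=
  if problems > 1 then false
  else pvA_scan problems [] vector
termination_by (vector.length + 1, 0)
decreasing_by simp [Prod.lex_def]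

def pvA_scan (problems : Int) (pre rest : List Int) : Bool :=
  match rest with
  | x :: y :: t =>
      if (x - y).natAbs = 0 ∨ 3 < (x - y).natAbs then
        determine_acceptable_variance_with_dampener (pre ++ y :: t) (problems + 1)
      else pvA_scan problems (pre ++ [x]) (y :: t)
  | _ => true
termination_by (pre.length + rest.length, rest.length)
decreasing_by
  · simp [Prod.lex_def, List.length_append]; omega
  · simp [Prod.lex_def, List.length_append]; omega
end

-- ===== PORT B =====
-- B-side helper: index of the first adjacent pair whose gap is 0 or > 3 (the inner for-loop of Source B).
def pvB_firstBad : List Int → Option Nat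
  | x :: y :: t =>
      if (x - y).natAbs = 0 ∨ 3 < (x - y).natAbs then some 0
      else (pvB_firstBad (y :: t)).map (· + 1)
  | _ => none

-- termination fact for the loop of B's port (cited by decreasing_by below)
theorem pvB_firstBad_lt : ∀ (v : List Int) (i : Nat), pvB_firstBad v = some i → i + 1 < v.length := by
  intro v
  induction v with
  | nil => intro i h; simp [pvB_firstBad] at h
  | cons x vs ih =>
    cases vs with
    | nil => intro i h; simp [pvB_firstBad] at h
    | cons y t =>
      intro i h
      simp only [pvB_firstBad] at h
      split at h
      · injection h with h
        subst h
        simp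
      · rw [Option.map_eq_some_iff] at h
        obtain ⟨j, hj, rfl⟩ := h
        have := ih j hj
        simp at this ⊢
        omega

-- B: the while-loop of Source B as recursion on the shrinking working list.
def determine_acceptable_variance_with_dampener_alt (vector : List Int) (problems : Int) : Bool :=
  if problems ≤ 1 then
    match h : pvB_firstBad vector with
    | none => true
    | some i =>
        determine_acceptable_variance_with_dampener_alt (vector.take i ++ vector.drop (i + 1)) (problems + 1)
  else false
termination_by vector.length
decreasing_by
  have := pvB_firstBad_lt vector i h
  simp
  omega

-- ===== PRECONDITION & SPEC =====
def Spec_determine_acceptable_variance_with_dampener (vector : List Int) (problems : Int) (out : Bool) : Prop := out = determine_acceptable_variance_with_dampener_alt vector problems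
instance (vector : List Int) (problems : Int) (out : Bool) : Decidable (Spec_determine_acceptable_variance_with_dampener vector problems out) := by unfold Spec_determine_acceptable_variance_with_dampener; infer_instance

-- ===== CLAIM (what is proved, stated in full; the proofs are below) =====
def Claim_equal_determine_acceptable_variance_with_dampener : Prop := ∀ (vector : List Int) (problems : Int), Dom_determine_acceptable_variance_with_dampener vector problems → Spec_determine_acceptable_variance_with_dampener vector problems (determine_acceptable_variance_with_dampener vector problems)

-- ===== LEMMAS AND PROOFS =====

theorem pv_alt_gt (v : List Int) (p : Int) (hp : ¬ p ≤ 1) :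
    determine_acceptable_variance_with_dampener_alt v p = false := by
  rw [determine_acceptable_variance_with_dampener_alt, if_neg hp]

theorem pv_alt_none (v : List Int) (p : Int) (h : pvB_firstBad v = none) (hp : p ≤ 1) :
    determine_acceptable_variance_with_dampener_alt v p = true := by
  rw [determine_acceptable_variance_with_dampener_alt, if_pos hp]
  split
  · rfl
  · simp_all

theorem pv_alt_some (v : List Int) (p : Int) (i : Nat) (h : pvB_firstBad v = some i) (hp : p ≤ 1) :
    determine_acceptable_variance_with_dampener_alt v p =
      determine_acceptable_variance_with_dampener_alt (v.take i ++ v.drop (i + 1)) (p + 1) := by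
  rw [determine_acceptable_variance_with_dampener_alt, if_pos hp]
  split
  · simp_all
  · simp_all

-- A's inner scan, started at (pre, rest), is B's first-bad-index search over rest:
-- no bad pair means True, and the recursive call removes exactly index j of rest.
theorem pvA_scan_char : ∀ (rest pre : List Int) (p : Int),
    pvA_scan p pre rest =
      match pvB_firstBad rest with
      | none => true
      | some j =>
          determine_acceptable_variance_with_dampener (pre ++ (rest.take j ++ rest.drop (j + 1))) (p + 1) := by
  intro rest
  induction rest with
  | nil => intro pre p; rw [pvA_scan] <;> simp [pvB_firstBad]
  | cons x vs ih =>
    cases vs with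
    | nil => intro pre p; rw [pvA_scan] <;> simp [pvB_firstBad]
    | cons y t =>
      intro pre p
      by_cases hb : (x - y).natAbs = 0 ∨ 3 < (x - y).natAbs
      · rw [pvA_scan]
        simp only [pvB_firstBad]
        rw [if_pos hb, if_pos hb]
        simp
      · rw [pvA_scan]
        rw [if_neg hb, ih]
        simp only [pvB_firstBad]
        rw [if_neg hb]
        cases hfb : pvB_firstBad (y :: t) with
        | none => simp
        | some j =>
          simp [List.take_succ_cons, List.drop_succ_cons, List.append_assoc]

theorem pv_main_aux : ∀ (n : Nat) (v : List Int) (p : Int), v.length ≤ n →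
    determine_acceptable_variance_with_dampener v p = determine_acceptable_variance_with_dampener_alt v p := by
  intro n
  induction n with
  | zero =>
    intro v p h
    have hv : v = [] := List.eq_nil_of_length_eq_zero (Nat.le_zero.mp h)
    subst hv
    rw [determine_acceptable_variance_with_dampener]
    by_cases hp : p > 1
    · rw [if_pos hp, pv_alt_gt _ _ (by omega)]
    · rw [if_neg hp, pv_alt_none _ _ (by simp [pvB_firstBad]) (by omega)]
      rw [pvA_scan]; simp
  | succ n ih =>
    intro v p h
    rw [determine_acceptable_variance_with_dampener]
    by_cases hp : p > 1
    · rw [if_pos hp, pv_alt_gt _ _ (by omega)]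
    · rw [if_neg hp, pvA_scan_char]
      cases hfb : pvB_firstBad v with
      | none =>
        exact (pv_alt_none v p hfb (by omega)).symm
      | some j =>
        have hl := pvB_firstBad_lt v j hfb
        rw [pv_alt_some _ _ j hfb (by omega)]
        simp only [List.nil_append]
        apply ih
        simp
        omega

-- ===== VERDICT (by name: the statement is the Claim_ definition above) =====
theorem determine_acceptable_variance_with_dampener_spec : Claim_equal_determine_acceptable_variance_with_dampener := by
  intro vector problems _
  unfold Spec_determine_acceptable_variance_with_dampener
  exact pv_main_aux vector.length vector problems le_rfl
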